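-- pv_equiv track=rewrite | github.com/ijulca/Orthology_analysis | ortho2cat.py | get_sp2num
-- ===== SOURCE A (Python) =====
-- def get_sp2num(genes):
--     species = {}
--     for g in genes:
--         sp = g.split('-')[-1]
--         if sp not in species:
--             species[sp] = 0
--         species[sp] += 1
--     return species
-- ===== SOURCE B (Python) =====
-- def get_sp2num(genes):
--     # Recursive partition: peel off the first remaining suffix, obtain its count
--     # from how much the list shrinks when all its occurrences are filtered out,
--     # then recurse on the residue (which contains only the other suffixes).
--     def go(sps):
--         if not sps:
--             return {}
--         sp = sps[0]
--         rest = [x for x in sps if x != sp]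
--         out = {sp: len(sps) - len(rest)}
--         out.update(go(rest))
--         return out
--     return go([g.split('-')[-1] for g in genes])
-- ===== Notes on version B (the rewrite author's own statement) =====
-- stated objective: alternative
-- what changed: Replaces A's single-pass incremental dict tally by a recursive partition: take the first suffix, derive its count from the length drop when filtering out all its occurrences, and recurse on the residue of remaining suffixes.
import Mathlib
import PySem

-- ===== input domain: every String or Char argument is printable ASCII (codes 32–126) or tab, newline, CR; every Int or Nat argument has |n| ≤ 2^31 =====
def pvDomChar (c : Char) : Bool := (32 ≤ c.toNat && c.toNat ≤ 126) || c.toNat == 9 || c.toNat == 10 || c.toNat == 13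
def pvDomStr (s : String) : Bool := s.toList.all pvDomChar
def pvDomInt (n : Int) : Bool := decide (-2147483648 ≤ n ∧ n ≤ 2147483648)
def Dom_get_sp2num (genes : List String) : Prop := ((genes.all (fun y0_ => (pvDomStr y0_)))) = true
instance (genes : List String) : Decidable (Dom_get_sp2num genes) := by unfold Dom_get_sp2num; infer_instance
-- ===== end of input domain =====

-- B replaces A's single-pass incremental dict tally by a recursive partition
-- (count first suffix by filtering it out, recurse on the residue) — alternative decomposition, same results.

-- ===== PORT A =====
-- g.split('-')[-1]: the separator "-" is nonempty so split? is always `some` of a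
-- nonempty list; the .getD [] and the pyGetD default "" are never reached — exact.
def pvSuffix (g : String) : String :=
  PySem.List.pyGetD ((PySem.Str.split? g "-").getD []) (-1) ""

def get_sp2num (genes : List String) : List (String × Int) :=
  (genes.foldl
    (fun species g =>
      let sp := pvSuffix g
      let species := if species.contains sp then species else species.insert sp 0
      species.insert sp (species.getD sp 0 + 1))
    (PySem.Dict.empty : PySem.Dict String Int)).items

-- ===== PORT B =====
-- inner recursive helper 'go' of Source B
def pvGo (sps : List String) : List (String × Int) :=
  match sps with
  | [] => []
  | sp :: tl =>
    let rest := (sp :: tl).filter (fun x => x != sp)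
    (sp, ((sp :: tl).length : Int) - (rest.length : Int)) :: pvGo rest
termination_by sps.length
decreasing_by
  simp only [List.filter_cons, bne_self_eq_false, List.length_cons]
  exact Nat.lt_succ_of_le (List.length_filter_le _ _)

def get_sp2num_alt (genes : List String) : List (String × Int) :=
  pvGo (genes.map pvSuffix)

-- ===== PRECONDITION & SPEC =====
def Spec_get_sp2num (genes : List String) (out : List (String × Int)) : Prop := out = get_sp2num_alt genes
instance (genes : List String) (out : List (String × Int)) : Decidable (Spec_get_sp2num genes out) := by unfold Spec_get_sp2num; infer_instance

-- ===== CLAIM (what is proved, stated in full; the proofs are below) =====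
def Claim_equal_get_sp2num : Prop := ∀ (genes : List String), Dom_get_sp2num genes → Spec_get_sp2num genes (get_sp2num genes)

-- ===== LEMMAS AND PROOFS =====

-- A's loop body (membership test, init to 0, increment) is the counter step.
theorem pv_step_eq (d : PySem.Dict String Int) (sp : String) :
    (let d' := if d.contains sp then d else d.insert sp 0;
     d'.insert sp (d'.getD sp 0 + 1)) = d.insert sp (d.getD sp 0 + 1) := by
  by_cases h : d.contains sp = true
  · simp [h]
  · simp only [Bool.not_eq_true] at h
    simp [h, PySem.Dict.getD_insert_self, PySem.Dict.insert_insert_self,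
      PySem.Dict.getD_of_not_contains d (0:Int) h]

-- once a is in the accumulator, occurrences of a in the list are no-ops for Set.add
theorem pv_foldl_add_filter (a : String) :
    ∀ (xs s : List String), a ∈ s →
      xs.foldl PySem.Set.add s = (xs.filter (fun x => x != a)).foldl PySem.Set.add s := by
  intro xs
  induction xs with
  | nil => intro s _; rfl
  | cons x tl ih =>
    intro s hs
    by_cases hx : x = a
    · subst hx
      simp only [List.filter_cons, bne_self_eq_false, List.foldl_cons, if_neg Bool.false_ne_true]
      have hadd : PySem.Set.add s x = s := by
        simp [PySem.Set.add, hs]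
      rw [hadd]; exact ih s hs
    · have hne : (x != a) = true := by simp [hx]
      simp only [List.filter_cons, hne, List.foldl_cons]
      apply ih
      simp only [PySem.Set.add]
      split
      · exact hs
      · exact List.mem_append_left _ hs

-- a fresh head stays in front: if no element of xs equals a, folding Set.add from
-- (a :: s) yields a consed onto the fold from s
theorem pv_foldl_add_head (a : String) :
    ∀ (xs s : List String), (∀ x ∈ xs, x ≠ a) →
      xs.foldl PySem.Set.add (a :: s) = a :: xs.foldl PySem.Set.add s := by
  intro xs
  induction xs with
  | nil => intro s _; rfl
  | cons x tl ih =>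
    intro s h
    have hxa : x ≠ a := h x (List.mem_cons_self ..)
    simp only [List.foldl_cons]
    have hstep : PySem.Set.add (a :: s) x = a :: PySem.Set.add s x := by
      have hc : PySem.Set.contains (a :: s) x = PySem.Set.contains s x := by
        simp [PySem.Set.contains, hxa]
      simp only [PySem.Set.add, hc]
      split <;> simp
    rw [hstep]
    exact ih _ (fun y hy => h y (List.mem_cons_of_mem _ hy))

-- first-occurrence dedup unfolds along B's partition
theorem pv_dedup_cons (a : String) (xs : List String) :
    PySem.List.dedup (a :: xs) = a :: PySem.List.dedup (xs.filter (fun x => x != a)) := by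
  have h1 : PySem.List.dedup (a :: xs) = xs.foldl PySem.Set.add [a] := by
    simp [PySem.List.dedup_eq_ofList, PySem.Set.ofList_eq_foldl, PySem.Set.add, PySem.Set.contains]
  have h2 : PySem.List.dedup (xs.filter (fun x => x != a)) =
      (xs.filter (fun x => x != a)).foldl PySem.Set.add [] := by
    simp [PySem.List.dedup_eq_ofList, PySem.Set.ofList_eq_foldl]
  have hmem : ∀ x ∈ xs.filter (fun x => x != a), x ≠ a := by
    intro x hx
    have := List.of_mem_filter hx
    simpa using this
  rw [h1, h2, pv_foldl_add_filter a xs [a] (List.mem_singleton.2 rfl)]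
  exact pv_foldl_add_head a _ [] hmem

-- B's recursion computes exactly (first-occurrence key, total count) pairs
theorem pvGo_eq (sps : List String) :
    pvGo sps = (PySem.List.dedup sps).map (fun k => (k, (sps.count k : Int))) := by
  induction sps using pvGo.induct with
  | case1 => simp [pvGo]
  | case2 sp tl rest ih =>
    rw [pvGo]
    have hrest : rest = tl.filter (fun x => x != sp) := by
      show List.filter (fun x => x != sp) (sp :: tl) = _
      simp
    rw [hrest] at ih
    simp only [List.filter_cons, bne_self_eq_false, Bool.false_eq_true, if_false]
    rw [ih, pv_dedup_cons, List.map_cons]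
    have hlen : tl.length = (tl.filter (fun x => x != sp)).length + tl.count sp := by
      have h1 := List.length_eq_countP_add_countP (l := tl) (p := fun x => x != sp)
      have h2 : tl.countP (fun a => decide (¬(a != sp) = true)) = tl.count sp := by
        apply List.countP_congr
        intro x _
        simp [bne]
      have h3 : (tl.filter (fun x => x != sp)).length = tl.countP (fun x => x != sp) := by
        simp [List.countP_eq_length_filter]
      omega
    congr 1
    · -- head pair: length drop = count of sp
      have hcount : (sp :: tl).count sp = tl.count sp + 1 := by simp
      rw [hcount]
      simp only [List.length_cons]
      congr 1
      push_cast
      omega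
    · -- tail: counts are unchanged on the residue's keys
      apply List.map_congr_left
      intro k hk
      have hkmem : k ∈ tl.filter (fun x => x != sp) :=
        (PySem.List.mem_dedup _ _).1 hk
      have hkne : k ≠ sp := by
        have := List.of_mem_filter hkmem
        simpa using this
      have hfk : (fun x => x != sp) k = true := by simp [hkne]
      have h2 := List.count_filter (l := tl) (p := fun x => x != sp) (a := k) hfk
      have hc : (sp :: tl).count k = (tl.filter (fun x => x != sp)).count k := by
        rw [List.count_cons, h2]
        simp [Ne.symm hkne]
      rw [hc]

-- ===== VERDICT (by name: the statement is the Claim_ definition above) =====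
theorem get_sp2num_spec : Claim_equal_get_sp2num := by
  intro genes _
  show get_sp2num genes = get_sp2num_alt genes
  unfold get_sp2num get_sp2num_alt
  simp only [pv_step_eq]
  rw [← List.foldl_map (f := pvSuffix)
        (g := fun (d : PySem.Dict String Int) x => d.insert x (d.getD x 0 + 1)),
    PySem.Dict.foldl_insert_getD_add_one_eq_counter, PySem.Dict.items_counter,
    pvGo_eq]
  simp [PySem.List.dedup_eq_ofList]
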